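-- pv_equiv track=rewrite | github.com/weathyou/knowledge-base-visualization-webpage | backend/app/services/parser.py | compact_row_cells
-- ===== SOURCE A (Python) =====
-- def compact_row_cells(cells: list[str]) -> list[str]:
--     compacted: list[str] = []
--     for cell in cells:
--         if not cell:
--             continue
--         if compacted and compacted[-1] == cell:
--             continue
--         compacted.append(cell)
--     return compacted
-- ===== SOURCE B (Python) =====
-- def compact_row_cells(cells: list[str]) -> list[str]:
--     # pass 1: drop empty cells; pass 2: keep one key per run of equal cells
--     xs = [c for c in cells if c]
--     out: list[str] = []
--     i = 0
--     n = len(xs)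
--     while i < n:
--         k = xs[i]
--         out.append(k)
--         while i < n and xs[i] == k:
--             i += 1
--     return out
-- ===== Notes on version B (the rewrite author's own statement) =====
-- stated objective: alternative
-- what changed: Replaces the single loop with a last-appended check by two passes: filter out empty cells, then a run-skipping (groupby-style) scan that appends each run's key once and skips its whole run; no 'last appended' state is kept.
import Mathlib
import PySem

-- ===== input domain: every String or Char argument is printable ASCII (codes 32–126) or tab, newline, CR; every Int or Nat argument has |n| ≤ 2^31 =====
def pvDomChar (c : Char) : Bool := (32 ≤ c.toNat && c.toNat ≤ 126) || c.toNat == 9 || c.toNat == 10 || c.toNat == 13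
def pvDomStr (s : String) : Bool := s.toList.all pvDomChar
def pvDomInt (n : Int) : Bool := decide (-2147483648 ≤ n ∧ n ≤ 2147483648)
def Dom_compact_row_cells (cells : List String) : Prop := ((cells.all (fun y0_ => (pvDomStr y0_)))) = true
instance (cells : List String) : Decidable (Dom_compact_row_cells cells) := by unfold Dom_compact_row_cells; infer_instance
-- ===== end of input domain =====

-- B: two passes (filter empties, then a run-skipping groupby-style scan) instead of A's single loop with a last-appended check; alternative decomposition, same cost.
-- ===== PORT A =====
-- A's loop: skip empty cells; skip a cell equal to the last appended; else append.
def pvLoopA (acc : List String) : List String → List String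
  | [] => acc
  | c :: cs =>
    if c = "" then pvLoopA acc cs
    else if acc ≠ [] ∧ acc.getLast? = some c then pvLoopA acc cs
    else pvLoopA (acc ++ [c]) cs

def compact_row_cells (cells : List String) : List String := pvLoopA [] cells

-- ===== PORT B =====
-- pass 2 of Source B: append the run's key, skip the whole run (the inner while = dropWhile)
def pvKeys : List String → List String
  | [] => []
  | x :: xs => x :: pvKeys (xs.dropWhile (· == x))
termination_by l => l.length
decreasing_by
  simpa using Nat.lt_succ_of_le (List.length_dropWhile_le _ _)

def compact_row_cells_alt (cells : List String) : List String :=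
  pvKeys (cells.filter (fun c => c ≠ ""))

-- ===== PRECONDITION & SPEC =====
def Spec_compact_row_cells (cells : List String) (out : List String) : Prop := out = compact_row_cells_alt cells
instance (cells : List String) (out : List String) : Decidable (Spec_compact_row_cells cells out) := by unfold Spec_compact_row_cells; infer_instance

-- ===== CLAIM (what is proved, stated in full; the proofs are below) =====
def Claim_equal_compact_row_cells : Prop := ∀ (cells : List String), Dom_compact_row_cells cells → Spec_compact_row_cells cells (compact_row_cells cells)

-- ===== LEMMAS AND PROOFS =====

-- ===== VERDICT (by name: the statement is the Claim_ definition above) =====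
-- destutter relative to an optional "last seen" value: A's behaviour (skip empties, skip repeats)
def pvDest (l : Option String) : List String → List String
  | [] => []
  | y :: ys =>
    if y = "" then pvDest l ys
    else if l = some y then pvDest l ys else y :: pvDest (some y) ys

theorem pvLoopA_eq (xs : List String) : ∀ acc : List String,
    pvLoopA acc xs = acc ++ pvDest acc.getLast? xs := by
  induction xs with
  | nil => intro acc; simp [pvLoopA, pvDest]
  | cons c cs ih =>
    intro acc
    by_cases hc : c = ""
    · rw [pvLoopA, if_pos hc, pvDest, if_pos hc]
      exact ih acc
    · rw [pvLoopA, if_neg hc, pvDest, if_neg hc]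
      by_cases hl : acc.getLast? = some c
      · have hacc : acc ≠ [] := by
          intro h; subst h; simp at hl
        rw [if_pos ⟨hacc, hl⟩, if_pos hl]
        exact ih acc
      · rw [if_neg (by tauto), if_neg hl, ih (acc ++ [c])]
        simp

theorem pvDest_some (ys : List String) : ∀ x : String, x ≠ "" →
    pvDest (some x) ys = pvKeys ((ys.filter (fun c => c ≠ "")).dropWhile (· == x)) := by
  induction ys with
  | nil => intro x _; simp [pvDest, pvKeys]
  | cons y ys ih =>
    intro x hx
    by_cases hy : y = ""
    · rw [pvDest, if_pos hy]
      have : (decide (y ≠ "")) = false := by simp [hy]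
      simp only [List.filter, this]
      exact ih x hx
    · rw [pvDest, if_neg hy]
      have : (decide (y ≠ "")) = true := by simp [hy]
      simp only [List.filter, this]
      by_cases hxy : x = y
      · subst hxy
        rw [if_pos rfl]
        simp only [List.dropWhile_cons, BEq.rfl, if_true]
        exact ih x hx
      · have hyx : ¬ (y = x) := fun h => hxy h.symm
        have hne : (y == x) = false := by simp [hyx]
        rw [if_neg (by simpa using hxy)]
        simp only [List.dropWhile_cons, hne, Bool.false_eq_true, if_false]
        rw [pvKeys, ih y hy]

theorem pvDest_none (ys : List String) :
    pvDest none ys = pvKeys (ys.filter (fun c => c ≠ "")) := by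
  induction ys with
  | nil => simp [pvDest, pvKeys]
  | cons y ys ih =>
    by_cases hy : y = ""
    · rw [pvDest, if_pos hy]
      have : (decide (y ≠ "")) = false := by simp [hy]
      simp only [List.filter, this]
      exact ih
    · rw [pvDest, if_neg hy, if_neg (by simp)]
      have : (decide (y ≠ "")) = true := by simp [hy]
      simp only [List.filter, this]
      rw [pvKeys, pvDest_some ys y hy]

-- ===== VERDICT =====
theorem compact_row_cells_spec : Claim_equal_compact_row_cells := by
  intro cells _
  unfold Spec_compact_row_cells compact_row_cells compact_row_cells_alt
  rw [pvLoopA_eq]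
  simpa using pvDest_none cells
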